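-- pv_equiv track=rewrite | github.com/981377660LMT/algorithm-study | 11_动态规划/经典题/二维棋盘分割/1444. 切披萨的方案数.py | ways
-- ===== SOURCE A (Python) =====
-- from typing import List
-- from functools import lru_cache
--
-- MOD = int(1e9 + 7)
--
-- def ways(pizza: List[str], k: int) -> int:
--     """
--     你需要切披萨 k-1 次，得到 k 块披萨并送给别人。
--     请你返回确保每一块披萨包含 至少 一个苹果的切披萨方案数
--     """
--
--     @lru_cache(None)
--     def dfs(row: int, col: int, remain: int) -> int:
--         """左上角(row,col)到右下角(ROW-1,COL-1)的披萨,还剩remain刀的切法"""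
--         if remain <= 0:
--             return 1 if P.sumRegion(row, ROW - 1, col, COL - 1) > 0 else 0
--
--         res = 0
--
--         # !横着切
--         for r in range(row, ROW):
--             if P.sumRegion(row, r, col, COL - 1) > 0:
--                 res += dfs(r + 1, col, remain - 1)
--         # !竖着切
--         for c in range(col, COL):
--             if P.sumRegion(row, ROW - 1, col, c) > 0:
--                 res += dfs(row, c + 1, remain - 1)
--
--         return res % MOD
--
--     P = PreSum2DDense([[1 if v == "A" else 0 for v in list(row)] for row in pizza])
--     ROW, COL = len(pizza), len(pizza[0])
--     return dfs(0, 0, k - 1)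
--
-- class PreSum2DDense:
--     """二维前缀和模板(矩阵不可变)"""
--
--     __slots__ = "_preSum"
--
--     def __init__(self, mat: List[List[int]]):
--         ROW, COL = len(mat), len(mat[0])
--         preSum = [[0] * (COL + 1) for _ in range(ROW + 1)]
--         for r in range(ROW):
--             tmpSum0, tmpSum1 = preSum[r], preSum[r + 1]
--             tmpM = mat[r]
--             for c in range(COL):
--                 tmpSum1[c + 1] = tmpM[c] + tmpSum0[c + 1] + tmpSum1[c] - tmpSum0[c]
--         self._preSum = preSum
--
--     def sumRegion(self, x1: int, x2: int, y1: int, y2: int) -> int: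
--         """查询sum(A[x1:x2+1, y1:y2+1])的值(包含边界)."""
--         if x1 > x2 or y1 > y2:
--             return 0
--         return (
--             self._preSum[x2 + 1][y2 + 1]
--             - self._preSum[x2 + 1][y1]
--             - self._preSum[x1][y2 + 1]
--             + self._preSum[x1][y1]
--         )
-- ===== SOURCE B (Python) =====
-- MOD = 10 ** 9 + 7
--
-- def ways(pizza, k):
--     R, C = len(pizza), len(pizza[0])
--     # suf[r][c] = number of apples in pizza[r:][c:C]
--     suf = [[0] * (C + 1) for _ in range(R + 1)]
--     for r in range(R - 1, -1, -1):
--         for c in range(C - 1, -1, -1):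
--             suf[r][c] = (suf[r + 1][c] + suf[r][c + 1] - suf[r + 1][c + 1]
--                          + (1 if pizza[r][c] == "A" else 0))
--     cuts = k - 1
--     if cuts <= 0:
--         return 1 if suf[0][0] > 0 else 0
--     if cuts > R + C:
--         return 0  # each cut shrinks the pizza, so this many cuts is impossible
--     dp = [[1 if suf[r][c] > 0 else 0 for c in range(C + 1)] for r in range(R + 1)]
--     for _ in range(cuts):
--         ndp = [[0] * (C + 1) for _ in range(R + 1)]
--         for r in range(R + 1):
--             for c in range(C + 1):
--                 total = 0
--                 for nr in range(r + 1, R + 1):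
--                     if suf[nr][c] < suf[r][c]:
--                         total += dp[nr][c]
--                 for nc in range(c + 1, C + 1):
--                     if suf[r][nc] < suf[r][c]:
--                         total += dp[r][nc]
--                 ndp[r][c] = total % MOD
--         dp = ndp
--     return dp[0][0]
-- ===== Notes on version B (the rewrite author's own statement) =====
-- stated objective: alternative
-- what changed: Replaces A's memoized top-down recursion over a 2D prefix-sum table by an explicit bottom-up layered DP over a 2D suffix apple-count table, with an immediate 0 when k-1 cuts exceed rows+cols (so huge k costs nothing).
import Mathlib
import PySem

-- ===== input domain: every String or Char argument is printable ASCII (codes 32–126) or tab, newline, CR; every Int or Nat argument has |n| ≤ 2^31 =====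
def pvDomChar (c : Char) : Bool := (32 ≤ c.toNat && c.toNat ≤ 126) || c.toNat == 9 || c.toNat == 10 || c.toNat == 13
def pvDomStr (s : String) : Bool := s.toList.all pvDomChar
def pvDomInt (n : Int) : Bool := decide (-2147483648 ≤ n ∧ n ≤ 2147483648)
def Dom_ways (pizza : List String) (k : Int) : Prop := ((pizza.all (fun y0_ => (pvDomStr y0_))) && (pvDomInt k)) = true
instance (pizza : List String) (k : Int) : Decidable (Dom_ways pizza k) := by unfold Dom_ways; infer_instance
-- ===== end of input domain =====

-- B replaces A's memoized top-down recursion over a 2D prefix-sum table by an explicit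
-- bottom-up layered DP over a 2D suffix apple-count table, returning 0 outright when
-- k-1 cuts are impossible (objective: alternative).

def pvMOD : Int := 1000000007

-- ===== PORT A =====
-- [[1 if v == "A" else 0 for v in list(row)] for row in pizza]
def waysGrid (pizza : List String) : List (List Int) :=
  pizza.map (fun row => row.toList.map (fun v => if v = 'A' then (1 : Int) else 0))

-- PreSum2DDense.__init__'s inner loop: preSum[r+1] (here built by appending cells left to
-- right, which is what writing tmpSum1[c+1] into a zero row amounts to) from preSum[r]
-- (= prev) and mat[r] (= m); index reads are exact where Python's are in range.
def waysNextRow (prev m : List Int) (COL : Nat) : List Int :=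
  (List.range COL).foldl
    (fun st c => st ++ [m.getD c 0 + prev.getD (c + 1) 0 + st.getD c 0 - prev.getD c 0]) [0]

-- the outer loop of __init__: rows 1..ROW of preSum, each from the previous one
def waysPreRows (COL : Nat) (prev : List Int) : List (List Int) → List (List Int)
  | [] => []
  | m :: rest =>
    let nr := waysNextRow prev m COL
    nr :: waysPreRows COL nr rest

def waysPreSum (mat : List (List Int)) (COL : Nat) : List (List Int) :=
  let z := List.replicate (COL + 1) 0
  z :: waysPreRows COL z mat

-- preSum[i][j]; exact where Python's indices are in range (they are in every use below)
def waysIdx (ps : List (List Int)) (i j : Int) : Int :=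
  PySem.List.pyGetD (PySem.List.pyGetD ps i []) j 0

def waysSumRegion (ps : List (List Int)) (x1 x2 y1 y2 : Int) : Int :=
  if x1 > x2 ∨ y1 > y2 then 0
  else waysIdx ps (x2 + 1) (y2 + 1) - waysIdx ps (x2 + 1) y1 - waysIdx ps x1 (y2 + 1)
       + waysIdx ps x1 y1

-- dfs(row, col, remain); lru_cache memoizes a pure function, so values are unchanged.
-- fuel only makes the recursion structural: every cut strictly shrinks the region, so
-- ROW + COL + 1 fuel is never exhausted (waysDfs_eq_cnt below never reaches the 0 case).
def waysDfs (ps : List (List Int)) (ROW COL : Int) : Nat → Int → Int → Int → Int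
  | 0, _, _, _ => 0
  | fuel + 1, row, col, remain =>
    if remain ≤ 0 then
      if 0 < waysSumRegion ps row (ROW - 1) col (COL - 1) then 1 else 0
    else
      -- res accumulates over the horizontal loop, then the vertical loop, then % MOD
      PySem.Int.mod
        ((PySem.List.pyRange col COL 1).foldl
          (fun res c =>
            if 0 < waysSumRegion ps row (ROW - 1) col c then
              res + waysDfs ps ROW COL fuel row (c + 1) (remain - 1)
            else res)
          ((PySem.List.pyRange row ROW 1).foldl
            (fun res r =>
              if 0 < waysSumRegion ps row r col (COL - 1) then
                res + waysDfs ps ROW COL fuel (r + 1) col (remain - 1)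
              else res) 0))
        pvMOD

def ways (pizza : List String) (k : Int) : Int :=
  let mat := waysGrid pizza
  -- len(pizza[0]) (= len(mat[0]) inside PreSum2DDense); Python raises on []: outside Pre_
  let COL : Nat := (pizza.headD "").toList.length
  let ps := waysPreSum mat COL
  let ROW : Nat := pizza.length
  waysDfs ps (ROW : Int) (COL : Int) (ROW + COL + 1) 0 0 (k - 1)

-- ===== PORT B =====
-- the backward inner loop of Source B's suf construction: cells c = C-1 .. 0 of suf[r],
-- each consed onto the already-built cells to its right (head = cell c+1); suf[r][C] = 0
def altSufRow (below : List Int) (row : List Char) (C : Nat) : List Int :=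
  (List.range C).foldr
    (fun c acc =>
      (below.getD c 0 + acc.headD 0 - below.getD (c + 1) 0
        + (if row.getD c ' ' = 'A' then 1 else 0)) :: acc) [0]

-- the backward outer loop: suf rows R-1 .. 0, each from the row below; last row all 0
def altSufTable (C : Nat) : List (List Char) → List (List Int)
  | [] => [List.replicate (C + 1) 0]
  | row :: rest =>
    let t := altSufTable C rest
    altSufRow (t.headD []) row C :: t

def altAt (m : List (List Int)) (r c : Nat) : Int := (m.getD r []).getD c 0

-- one pass of Source B's 'for _ in range(cuts)' loop: next layer ndp from dp
def altStep (suf : List (List Int)) (R C : Nat) (dp : List (List Int)) : List (List Int) :=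
  (List.range (R + 1)).map (fun r => (List.range (C + 1)).map (fun c =>
    PySem.Int.mod
      ((List.range' (c + 1) (C - c)).foldl
        (fun t nc => if altAt suf r nc < altAt suf r c then t + altAt dp r nc else t)
        ((List.range' (r + 1) (R - r)).foldl
          (fun t nr => if altAt suf nr c < altAt suf r c then t + altAt dp nr c else t) 0))
      pvMOD))

def ways_alt (pizza : List String) (k : Int) : Int :=
  let R := pizza.length
  let C := (pizza.headD "").toList.length  -- len(pizza[0]); raises on [] exactly as A does
  let suf := altSufTable C (pizza.map String.toList)
  let cuts := k - 1
  if cuts ≤ 0 then (if 0 < altAt suf 0 0 then 1 else 0)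
  else if ((R : Int) + (C : Int)) < cuts then 0
  else
    let dp0 := (List.range (R + 1)).map (fun r => (List.range (C + 1)).map (fun c =>
      if 0 < altAt suf r c then (1 : Int) else 0))
    altAt ((altStep suf R C)^[cuts.toNat] dp0) 0 0

-- ===== PRECONDITION & SPEC =====
-- Pre_ excludes exactly the inputs where A raises IndexError: an empty pizza (pizza[0])
-- and ragged pizzas with a row shorter than the first row (PreSum2DDense reads tmpM[c]
-- for c < len(mat[0])).
def Pre_ways (pizza : List String) (k : Int) : Prop :=
  pizza ≠ [] ∧ ∀ s ∈ pizza, (pizza.headD "").toList.length ≤ s.toList.length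
instance (pizza : List String) (k : Int) : Decidable (Pre_ways pizza k) := by
  unfold Pre_ways; infer_instance

def pvWitness_ways : List String × Int := (["A.", ".A"], 2)

def Spec_ways (pizza : List String) (k : Int) (out : Int) : Prop := out = ways_alt pizza k
instance (pizza : List String) (k : Int) (out : Int) : Decidable (Spec_ways pizza k out) := by
  unfold Spec_ways; infer_instance

-- ===== CLAIM (what is proved, stated in full; the proofs are below) =====
def Claim_equal_ways : Prop := ∀ (pizza : List String) (k : Int),
  Dom_ways pizza k → Pre_ways pizza k → Spec_ways pizza k (ways pizza k)

-- ===== LEMMAS AND PROOFS =====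

-- number of rows / columns of the pizza
def pvR (pizza : List String) : Nat := pizza.length
def pvC (pizza : List String) : Nat := (pizza.headD "").toList.length

-- apple indicator of cell (r, c)
def pvInd (pizza : List String) (r c : Nat) : Int :=
  if ((pizza.getD r "").toList.getD c ' ') = 'A' then 1 else 0

-- apples strictly above row i and left of column j
def pvPre (pizza : List String) (i j : Nat) : Int :=
  ∑ r ∈ Finset.range i, ∑ c ∈ Finset.range j, pvInd pizza r c

-- apples in rows ≥ r, columns in [c, C)
def pvApp (pizza : List String) (r c : Nat) : Int :=
  ∑ r' ∈ Finset.Ico r (pvR pizza), ∑ c' ∈ Finset.Ico c (pvC pizza), pvInd pizza r' c'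

-- the common mathematical value of both programs: dfs(r, c, t) = dp layer t at (r, c)
def pvCnt (pizza : List String) : Nat → Nat → Nat → Int
  | 0 => fun r c => if 0 < pvApp pizza r c then 1 else 0
  | t + 1 => fun r c =>
    PySem.Int.mod
      ((List.range' (c + 1) (pvC pizza - c)).foldl
        (fun s nc => if pvApp pizza r nc < pvApp pizza r c then s + pvCnt pizza t r nc else s)
        ((List.range' (r + 1) (pvR pizza - r)).foldl
          (fun s nr => if pvApp pizza nr c < pvApp pizza r c then s + pvCnt pizza t nr c else s) 0))
      pvMOD

lemma pvApp_row_ge (pizza : List String) (r c : Nat) (h : pvR pizza ≤ r) :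
    pvApp pizza r c = 0 := by
  unfold pvApp
  rw [Finset.Ico_eq_empty (by omega)]
  simp

lemma pvApp_col_ge (pizza : List String) (r c : Nat) (h : pvC pizza ≤ c) :
    pvApp pizza r c = 0 := by
  unfold pvApp
  have : ∀ r' ∈ Finset.Ico r (pvR pizza),
      (∑ c' ∈ Finset.Ico c (pvC pizza), pvInd pizza r' c') = 0 := by
    intro r' _
    rw [Finset.Ico_eq_empty (by omega)]
    simp
  rw [Finset.sum_congr rfl this]
  simp

lemma pvPre_rec (pizza : List String) (r c : Nat) :
    pvPre pizza (r + 1) (c + 1)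
      = pvInd pizza r c + pvPre pizza r (c + 1) + pvPre pizza (r + 1) c - pvPre pizza r c := by
  simp [pvPre, Finset.sum_range_succ]
  ring

lemma pvApp_rec (pizza : List String) (r c : Nat) (hr : r < pvR pizza) (hc : c < pvC pizza) :
    pvApp pizza r c
      = pvApp pizza (r + 1) c + pvApp pizza r (c + 1) - pvApp pizza (r + 1) (c + 1)
        + pvInd pizza r c := by
  simp only [pvApp, Finset.sum_eq_sum_Ico_succ_bot hr, Finset.sum_eq_sum_Ico_succ_bot hc,
    Finset.sum_add_distrib]
  ring

lemma pvApp_eq_pre (pizza : List String) (r c : Nat) (hr : r ≤ pvR pizza) (hc : c ≤ pvC pizza) :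
    pvApp pizza r c
      = pvPre pizza (pvR pizza) (pvC pizza) - pvPre pizza r (pvC pizza)
        - pvPre pizza (pvR pizza) c + pvPre pizza r c := by
  simp only [pvApp, pvPre, Finset.sum_Ico_eq_sub _ hc, Finset.sum_Ico_eq_sub _ hr,
    Finset.sum_sub_distrib]
  ring

lemma pvGetD_map_range (f : Nat → Int) (n k : Nat) (h : k < n) :
    ((List.range n).map f).getD k 0 = f k := by
  rw [List.getD_eq_getElem _ _ (by simpa using h)]
  simp

lemma pvGetD_map_range' (f : Nat → List Int) (n k : Nat) (h : k < n) :
    ((List.range n).map f).getD k [] = f k := by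
  rw [List.getD_eq_getElem _ _ (by simpa using h)]
  simp

lemma waysNextRow_spec (pizza : List String) (r : Nat) (m : List Int)
    (hm : ∀ c < pvC pizza, m.getD c 0 = pvInd pizza r c) :
    waysNextRow ((List.range (pvC pizza + 1)).map (pvPre pizza r)) m (pvC pizza)
      = (List.range (pvC pizza + 1)).map (pvPre pizza (r + 1)) := by
  have aux : ∀ n, n ≤ pvC pizza →
      (List.range n).foldl
        (fun st c => st ++ [m.getD c 0 + ((List.range (pvC pizza + 1)).map (pvPre pizza r)).getD (c + 1) 0
          + st.getD c 0 - ((List.range (pvC pizza + 1)).map (pvPre pizza r)).getD c 0]) [0]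
        = (List.range (n + 1)).map (pvPre pizza (r + 1)) := by
    intro n
    induction n with
    | zero =>
      intro _
      simp [pvPre]
    | succ n ih =>
      intro hn
      rw [List.range_succ (n := n), List.foldl_append, ih (by omega)]
      simp only [List.foldl_cons, List.foldl_nil]
      rw [pvGetD_map_range _ _ _ (by omega), pvGetD_map_range _ _ _ (by omega),
        pvGetD_map_range _ _ _ (by omega), hm n (by omega)]
      rw [List.range_succ (n := n + 1), List.map_append]
      congr 1
      simp only [List.map_cons, List.map_nil, List.cons.injEq, and_true]
      rw [pvPre_rec]
  exact aux (pvC pizza) le_rfl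

lemma waysPreRows_spec (pizza : List String)
    (hlen : ∀ s ∈ pizza, pvC pizza ≤ s.toList.length) :
    ∀ (rest : List (List Int)) (r : Nat), r ≤ pvR pizza →
      rest = (waysGrid pizza).drop r →
      waysPreRows (pvC pizza) ((List.range (pvC pizza + 1)).map (pvPre pizza r)) rest
        = (List.range' (r + 1) (pvR pizza - r)).map
            (fun i => (List.range (pvC pizza + 1)).map (pvPre pizza i)) := by
  intro rest
  induction rest with
  | nil =>
    intro r _ hdrop
    have hlen' := congrArg List.length hdrop
    simp only [List.length_nil, List.length_drop, waysGrid, List.length_map] at hlen'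
    have : pvR pizza - r = 0 := by simp only [pvR]; omega
    rw [this]
    simp [waysPreRows]
  | cons m rest' ih =>
    intro r hr hdrop
    have hrlt : r < pizza.length := by
      by_contra hge
      have hge' := Nat.le_of_not_lt hge
      rw [List.drop_eq_nil_of_le (by simp [waysGrid]; omega)] at hdrop
      simp at hdrop
    have hlenW : r < (waysGrid pizza).length := by simpa [waysGrid] using hrlt
    rw [List.drop_eq_getElem_cons hlenW] at hdrop
    rw [List.cons_eq_cons] at hdrop
    obtain ⟨hm0, hrest⟩ := hdrop
    simp only [waysPreRows]
    have hmvals : ∀ c < pvC pizza, m.getD c 0 = pvInd pizza r c := by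
      intro c hc
      have hclen : c < pizza[r].toList.length :=
        lt_of_lt_of_le hc (hlen _ (pizza.getElem_mem hrlt))
      rw [hm0]
      simp only [waysGrid, List.getElem_map]
      rw [List.getD_eq_getElem _ _ (by simpa using hclen), List.getElem_map]
      unfold pvInd
      rw [List.getD_eq_getElem _ _ hrlt]
      rw [List.getD_eq_getElem _ _ (by simpa using hclen)]
    rw [waysNextRow_spec pizza r m hmvals]
    rw [ih (r + 1) (by simp only [pvR]; omega) hrest]
    have : pvR pizza - r = (pvR pizza - (r + 1)) + 1 := by simp only [pvR]; omega
    rw [this, List.range'_succ]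
    simp


lemma waysPreSum_spec (pizza : List String)
    (hlen : ∀ s ∈ pizza, pvC pizza ≤ s.toList.length) :
    waysPreSum (waysGrid pizza) (pvC pizza)
      = (List.range (pvR pizza + 1)).map
          (fun i => (List.range (pvC pizza + 1)).map (pvPre pizza i)) := by
  have hz : (List.range (pvC pizza + 1)).map (pvPre pizza 0) = List.replicate (pvC pizza + 1) 0 := by
    refine List.eq_replicate_iff.mpr ⟨by simp, ?_⟩
    intro b hb
    simp only [List.mem_map, List.mem_range] at hb
    obtain ⟨j, _, hj⟩ := hb
    simp [← hj, pvPre]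
  simp only [waysPreSum]
  rw [← hz, waysPreRows_spec pizza hlen (waysGrid pizza) 0 (by omega) List.drop_zero.symm]
  have : List.range (pvR pizza + 1) = 0 :: List.range' 1 (pvR pizza) := by
    rw [List.range_eq_range', List.range'_succ]
  rw [this]
  simp

lemma waysIdx_spec (pizza : List String)
    (hlen : ∀ s ∈ pizza, pvC pizza ≤ s.toList.length) (i j : Int)
    (hi0 : 0 ≤ i) (hi : i ≤ (pvR pizza : Int)) (hj0 : 0 ≤ j) (hj : j ≤ (pvC pizza : Int)) :
    waysIdx (waysPreSum (waysGrid pizza) (pvC pizza)) i j = pvPre pizza i.toNat j.toNat := by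
  rw [waysPreSum_spec pizza hlen]
  unfold waysIdx
  rw [PySem.List.pyGetD_of_nonneg _ _ hi0, PySem.List.pyGetD_of_nonneg _ _ hj0]
  rw [pvGetD_map_range' _ _ _ (by omega), pvGetD_map_range _ _ _ (by omega)]

lemma waysSumRegion_horiz (pizza : List String)
    (hlen : ∀ s ∈ pizza, pvC pizza ≤ s.toList.length) (row col r : Int)
    (h1 : 0 ≤ row) (h2 : 0 ≤ col) (h3 : col ≤ (pvC pizza : Int))
    (h4 : row ≤ r + 1) (h5 : r + 1 ≤ (pvR pizza : Int)) :
    waysSumRegion (waysPreSum (waysGrid pizza) (pvC pizza)) row r col ((pvC pizza : Int) - 1)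
      = pvApp pizza row.toNat col.toNat - pvApp pizza (r + 1).toNat col.toNat := by
  unfold waysSumRegion
  by_cases hc1 : row > r
  · rw [if_pos (Or.inl hc1)]
    have : row = r + 1 := by omega
    rw [this]
    simp
  · by_cases hc2 : col > (pvC pizza : Int) - 1
    · rw [if_pos (Or.inr hc2)]
      rw [pvApp_col_ge pizza row.toNat col.toNat (by omega),
        pvApp_col_ge pizza (r + 1).toNat col.toNat (by omega)]
      simp
    · rw [if_neg (by omega)]
      have e1 : (pvC pizza : Int) - 1 + 1 = (pvC pizza : Int) := by ring
      rw [e1]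
      rw [waysIdx_spec pizza hlen (r + 1) (pvC pizza : Int) (by omega) (by omega) (by omega) (by omega),
        waysIdx_spec pizza hlen (r + 1) col (by omega) (by omega) (by omega) (by omega),
        waysIdx_spec pizza hlen row (pvC pizza : Int) (by omega) (by omega) (by omega) (by omega),
        waysIdx_spec pizza hlen row col (by omega) (by omega) (by omega) (by omega)]
      rw [pvApp_eq_pre pizza row.toNat col.toNat (by omega) (by omega),
        pvApp_eq_pre pizza (r + 1).toNat col.toNat (by omega) (by omega)]
      have e2 : ((pvC pizza : Int)).toNat = pvC pizza := by omega
      rw [e2]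
      ring

lemma waysSumRegion_vert (pizza : List String)
    (hlen : ∀ s ∈ pizza, pvC pizza ≤ s.toList.length) (row col c : Int)
    (h1 : 0 ≤ row) (h2 : row ≤ (pvR pizza : Int)) (h3 : 0 ≤ col)
    (h4 : col ≤ c + 1) (h5 : c + 1 ≤ (pvC pizza : Int)) :
    waysSumRegion (waysPreSum (waysGrid pizza) (pvC pizza)) row ((pvR pizza : Int) - 1) col c
      = pvApp pizza row.toNat col.toNat - pvApp pizza row.toNat (c + 1).toNat := by
  unfold waysSumRegion
  by_cases hc1 : row > (pvR pizza : Int) - 1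
  · rw [if_pos (Or.inl hc1)]
    rw [pvApp_row_ge pizza row.toNat col.toNat (by omega),
      pvApp_row_ge pizza row.toNat (c + 1).toNat (by omega)]
    simp
  · by_cases hc2 : col > c
    · rw [if_pos (Or.inr hc2)]
      have : col = c + 1 := by omega
      rw [this]
      simp
    · rw [if_neg (by omega)]
      have e1 : (pvR pizza : Int) - 1 + 1 = (pvR pizza : Int) := by ring
      rw [e1]
      rw [waysIdx_spec pizza hlen (pvR pizza : Int) (c + 1) (by omega) (by omega) (by omega) (by omega),
        waysIdx_spec pizza hlen (pvR pizza : Int) col (by omega) (by omega) (by omega) (by omega),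
        waysIdx_spec pizza hlen row (c + 1) (by omega) (by omega) (by omega) (by omega),
        waysIdx_spec pizza hlen row col (by omega) (by omega) (by omega) (by omega)]
      rw [pvApp_eq_pre pizza row.toNat col.toNat (by omega) (by omega),
        pvApp_eq_pre pizza row.toNat (c + 1).toNat (by omega) (by omega)]
      have e2 : ((pvR pizza : Int)).toNat = pvR pizza := by omega
      rw [e2]
      ring

lemma waysDfs_eq_cnt (pizza : List String)
    (hlen : ∀ s ∈ pizza, pvC pizza ≤ s.toList.length) :
    ∀ (fuel : Nat) (t : Nat) (row col remain : Int), 0 ≤ row → row ≤ (pvR pizza : Int) →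
      0 ≤ col → col ≤ (pvC pizza : Int) → remain.toNat = t →
      ((pvR pizza : Int) - row).toNat + ((pvC pizza : Int) - col).toNat < fuel →
      waysDfs (waysPreSum (waysGrid pizza) (pvC pizza)) (pvR pizza : Int) (pvC pizza : Int)
          fuel row col remain
        = pvCnt pizza t row.toNat col.toNat := by
  intro fuel
  induction fuel with
  | zero =>
    intro t row col remain _ _ _ _ _ hm
    omega
  | succ fuel ihf =>
    intro t row col remain h0r hrR h0c hcC ht hm
    cases t with
    | zero =>
      have hrem : remain ≤ 0 := by omega
      simp only [waysDfs]
      rw [if_pos hrem]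
      rw [waysSumRegion_horiz pizza hlen row col ((pvR pizza : Int) - 1) h0r h0c hcC (by omega) (by omega)]
      have e : ((pvR pizza : Int) - 1 + 1).toNat = pvR pizza := by omega
      rw [e, pvApp_row_ge pizza (pvR pizza) col.toNat le_rfl, sub_zero]
      simp only [pvCnt]
    | succ t =>
      have hrem : ¬ remain ≤ 0 := by omega
      simp only [waysDfs]
      rw [if_neg hrem]
      simp only [pvCnt]
      have hH : (PySem.List.pyRange row (pvR pizza : Int) 1).foldl
          (fun res r' =>
            if 0 < waysSumRegion (waysPreSum (waysGrid pizza) (pvC pizza)) row r' col ((pvC pizza : Int) - 1) then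
              res + waysDfs (waysPreSum (waysGrid pizza) (pvC pizza)) (pvR pizza : Int) (pvC pizza : Int)
                fuel (r' + 1) col (remain - 1)
            else res) 0
          = (List.range' (row.toNat + 1) (pvR pizza - row.toNat)).foldl
              (fun s nr => if pvApp pizza nr col.toNat < pvApp pizza row.toNat col.toNat then
                s + pvCnt pizza t nr col.toNat else s) 0 := by
        rw [PySem.List.pyRange_one, List.foldl_map,
          List.range'_eq_map_range, List.foldl_map]
        have hn : ((pvR pizza : Int) - row).toNat = pvR pizza - row.toNat := by omega
        rw [hn]
        apply PySem.List.foldl_congr_mem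
        intro acc kk hk
        have hklt : kk < pvR pizza - row.toNat := List.mem_range.mp hk
        rw [waysSumRegion_horiz pizza hlen row col (row + kk) h0r h0c hcC (by omega) (by omega)]
        rw [ihf t (row + kk + 1) col (remain - 1) (by omega) (by omega) h0c hcC (by omega) (by omega)]
        have e1 : (row + (kk : Int) + 1).toNat = row.toNat + 1 + kk := by omega
        rw [e1]
        simp only [sub_pos]
      rw [hH]
      congr 1
      rw [PySem.List.pyRange_one, List.foldl_map,
        List.range'_eq_map_range, List.foldl_map, List.range'_eq_map_range, List.foldl_map]
      have hn : ((pvC pizza : Int) - col).toNat = pvC pizza - col.toNat := by omega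
      rw [hn]
      apply PySem.List.foldl_congr_mem
      intro acc kk hk
      have hklt : kk < pvC pizza - col.toNat := List.mem_range.mp hk
      rw [waysSumRegion_vert pizza hlen row col (col + kk) h0r hrR h0c (by omega) (by omega)]
      rw [ihf t row (col + kk + 1) (remain - 1) h0r hrR (by omega) (by omega) (by omega) (by omega)]
      have e1 : (col + (kk : Int) + 1).toNat = col.toNat + 1 + kk := by omega
      rw [e1]
      simp only [sub_pos]

lemma altSufRow_aux (below : List Int) (row : List Char) :
    ∀ (n : Nat) (acc : List Int) (F : Nat → Int), acc.headD 0 = F n →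
      (∀ c < n, F c = below.getD c 0 + F (c + 1) - below.getD (c + 1) 0
          + (if row.getD c ' ' = 'A' then 1 else 0)) →
      (List.range n).foldr
        (fun c acc =>
          (below.getD c 0 + acc.headD 0 - below.getD (c + 1) 0
            + (if row.getD c ' ' = 'A' then 1 else 0)) :: acc) acc
        = (List.range n).map F ++ acc := by
  intro n
  induction n with
  | zero => intro acc F _ _; simp
  | succ n ih =>
    intro acc F hacc hrec
    rw [List.range_succ, List.foldr_append]
    have hstep : (List.foldr
        (fun c acc =>
          (below.getD c 0 + acc.headD 0 - below.getD (c + 1) 0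
            + (if row.getD c ' ' = 'A' then 1 else 0)) :: acc) acc [n])
        = F n :: acc := by
      simp only [List.foldr_cons, List.foldr_nil]
      rw [hacc, ← hrec n (by omega)]
    rw [hstep, ih (F n :: acc) F rfl (fun c hc => hrec c (by omega))]
    simp

lemma altSufTable_spec (pizza : List String)
    (_hlen : ∀ s ∈ pizza, pvC pizza ≤ s.toList.length) :
    ∀ (rest : List (List Char)) (r : Nat), r ≤ pvR pizza →
      rest = (pizza.map String.toList).drop r →
      altSufTable (pvC pizza) rest
        = (List.range' r (pvR pizza - r + 1)).map
            (fun i => (List.range (pvC pizza + 1)).map (pvApp pizza i)) := by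
  have hzrow : (List.range (pvC pizza + 1)).map (pvApp pizza (pvR pizza))
      = List.replicate (pvC pizza + 1) 0 := by
    refine List.eq_replicate_iff.mpr ⟨by simp, ?_⟩
    intro b hb
    simp only [List.mem_map, List.mem_range] at hb
    obtain ⟨j, _, hj⟩ := hb
    rw [← hj]
    exact pvApp_row_ge pizza _ _ le_rfl
  intro rest
  induction rest with
  | nil =>
    intro r hr hdrop
    have hlen' := congrArg List.length hdrop
    simp only [List.length_nil, List.length_drop, List.length_map] at hlen'
    have hrR : r = pvR pizza := by simp only [pvR] at hr ⊢; omega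
    rw [hrR, Nat.sub_self, List.range'_one]
    simp only [altSufTable, List.map_cons, List.map_nil]
    rw [hzrow]
  | cons row rest' ih =>
    intro r hr hdrop
    have hrlt : r < pizza.length := by
      by_contra hge
      have hge' := Nat.le_of_not_lt hge
      rw [List.drop_eq_nil_of_le (by simpa using hge')] at hdrop
      simp at hdrop
    rw [List.drop_eq_getElem_cons (by simpa using hrlt)] at hdrop
    rw [List.cons_eq_cons] at hdrop
    obtain ⟨hrow, hrest⟩ := hdrop
    simp only [altSufTable]
    rw [ih (r + 1) (by simp only [pvR]; omega) hrest]
    have hcnt : pvR pizza - (r + 1) + 1 = pvR pizza - r := by simp only [pvR]; omega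
    rw [hcnt]
    have hne : pvR pizza - r = (pvR pizza - r - 1) + 1 := by simp only [pvR]; omega
    rw [hne, List.range'_succ, List.map_cons, List.headD_cons]
    have hrowvals : altSufRow ((List.range (pvC pizza + 1)).map (pvApp pizza (r + 1))) row (pvC pizza)
        = (List.range (pvC pizza + 1)).map (pvApp pizza r) := by
      unfold altSufRow
      rw [altSufRow_aux _ row (pvC pizza) [0] (pvApp pizza r)
        (by simp [pvApp_col_ge pizza r (pvC pizza) le_rfl])
        ?hrec]
      case hrec =>
        intro c hc
        rw [pvGetD_map_range _ _ _ (by omega), pvGetD_map_range _ _ _ (by omega)]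
        rw [pvApp_rec pizza r c (by simpa [pvR] using hrlt) hc]
        have hindeq : pvInd pizza r c = (if row.getD c ' ' = 'A' then (1 : Int) else 0) := by
          unfold pvInd
          rw [List.getD_eq_getElem _ _ hrlt, hrow, List.getElem_map]
        rw [hindeq]
      rw [List.range_succ (n := pvC pizza), List.map_append]
      congr 1
      simp [pvApp_col_ge pizza r (pvC pizza) le_rfl]
    rw [hrowvals]
    simp [List.range'_succ]

lemma altAt_suf (pizza : List String)
    (hlen : ∀ s ∈ pizza, pvC pizza ≤ s.toList.length) (r c : Nat)
    (hr : r ≤ pvR pizza) (hc : c ≤ pvC pizza) :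
    altAt (altSufTable (pvC pizza) (pizza.map String.toList)) r c = pvApp pizza r c := by
  rw [altSufTable_spec pizza hlen (pizza.map String.toList) 0 (by omega) List.drop_zero.symm]
  unfold altAt
  rw [Nat.sub_zero, ← List.range_eq_range']
  rw [pvGetD_map_range' _ _ _ (by omega), pvGetD_map_range _ _ _ (by omega)]

def pvDpTable (pizza : List String) (t : Nat) : List (List Int) :=
  (List.range (pvR pizza + 1)).map
    (fun r => (List.range (pvC pizza + 1)).map (fun c => pvCnt pizza t r c))

lemma altAt_dp (pizza : List String) (t r c : Nat) (hr : r ≤ pvR pizza) (hc : c ≤ pvC pizza) :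
    altAt (pvDpTable pizza t) r c = pvCnt pizza t r c := by
  unfold altAt pvDpTable
  rw [pvGetD_map_range' _ _ _ (by omega), pvGetD_map_range _ _ _ (by omega)]

lemma altIter_spec (pizza : List String)
    (hlen : ∀ s ∈ pizza, pvC pizza ≤ s.toList.length) (t : Nat) :
    (altStep (altSufTable (pvC pizza) (pizza.map String.toList)) (pvR pizza) (pvC pizza))^[t]
        ((List.range (pvR pizza + 1)).map (fun r => (List.range (pvC pizza + 1)).map (fun c =>
          if 0 < altAt (altSufTable (pvC pizza) (pizza.map String.toList)) r c then (1 : Int) else 0)))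
      = pvDpTable pizza t := by
  induction t with
  | zero =>
    simp only [Function.iterate_zero, id]
    unfold pvDpTable
    apply List.map_congr_left
    intro r hr
    have hr' := List.mem_range.mp hr
    apply List.map_congr_left
    intro c hc
    have hc' := List.mem_range.mp hc
    rw [altAt_suf pizza hlen r c (by omega) (by omega)]
    simp only [pvCnt]
  | succ t ih =>
    rw [Function.iterate_succ_apply', ih]
    unfold altStep
    conv_rhs => unfold pvDpTable
    apply List.map_congr_left
    intro r hr
    have hr' := List.mem_range.mp hr
    apply List.map_congr_left
    intro c hc
    have hc' := List.mem_range.mp hc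
    simp only [pvCnt]
    have hH : (List.range' (r + 1) (pvR pizza - r)).foldl
        (fun t' nr => if altAt (altSufTable (pvC pizza) (pizza.map String.toList)) nr c
              < altAt (altSufTable (pvC pizza) (pizza.map String.toList)) r c then
            t' + altAt (pvDpTable pizza t) nr c else t') 0
        = (List.range' (r + 1) (pvR pizza - r)).foldl
            (fun s nr => if pvApp pizza nr c < pvApp pizza r c then
              s + pvCnt pizza t nr c else s) 0 := by
      apply PySem.List.foldl_congr_mem
      intro acc nr hmem
      have hb := List.mem_range'_1.mp hmem
      rw [altAt_suf pizza hlen nr c (by omega) (by omega),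
        altAt_suf pizza hlen r c (by omega) (by omega),
        altAt_dp pizza t nr c (by omega) (by omega)]
    rw [hH]
    congr 1
    apply PySem.List.foldl_congr_mem
    intro acc nc hmem
    have hb := List.mem_range'_1.mp hmem
    rw [altAt_suf pizza hlen r nc (by omega) (by omega),
      altAt_suf pizza hlen r c (by omega) (by omega),
      altAt_dp pizza t r nc (by omega) (by omega)]

lemma pvCnt_vanish (pizza : List String) :
    ∀ (t r c : Nat), (pvR pizza - r) + (pvC pizza - c) ≤ t → 0 < t →
      pvCnt pizza t r c = 0 := by
  intro t
  induction t with
  | zero => intro r c _ h0; omega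
  | succ t ih =>
    intro r c h _
    have h1 : (List.range' (r + 1) (pvR pizza - r)).foldl
        (fun s nr => if pvApp pizza nr c < pvApp pizza r c then s + pvCnt pizza t nr c else s) 0
        = 0 := by
      rw [PySem.List.foldl_congr_mem (g := fun s _ => s)]
      · exact PySem.List.foldl_ignore ..
      · intro s nr hmem
        have hb := List.mem_range'_1.mp hmem
        have hz : pvCnt pizza t nr c = 0 := by
          cases t with
          | zero => simp [pvCnt, pvApp_row_ge pizza nr c (by omega)]
          | succ t' => exact ih nr c (by omega) (by omega)
        rw [hz]
        simp
    have h2 : (List.range' (c + 1) (pvC pizza - c)).foldl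
        (fun s nc => if pvApp pizza r nc < pvApp pizza r c then s + pvCnt pizza t r nc else s) 0
        = 0 := by
      rw [PySem.List.foldl_congr_mem (g := fun s _ => s)]
      · exact PySem.List.foldl_ignore ..
      · intro s nc hmem
        have hb := List.mem_range'_1.mp hmem
        have hz : pvCnt pizza t r nc = 0 := by
          cases t with
          | zero => simp [pvCnt, pvApp_row_ge pizza r nc (by omega)]
          | succ t' => exact ih r nc (by omega) (by omega)
        rw [hz]
        simp
    simp only [pvCnt]
    rw [h1, h2]
    decide

-- ===== VERDICT (by name: the statement is the Claim_ definition above) =====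
theorem ways_spec : Claim_equal_ways := by
  unfold Claim_equal_ways
  intro pizza k _ hpre
  unfold Spec_ways
  obtain ⟨hne, hlen0⟩ := hpre
  have hlen : ∀ s ∈ pizza, pvC pizza ≤ s.toList.length := hlen0
  simp only [ways, ways_alt]
  rw [show (pizza.headD "").toList.length = pvC pizza from rfl,
    show pizza.length = pvR pizza from rfl]
  have hdfs := waysDfs_eq_cnt pizza hlen (pvR pizza + pvC pizza + 1) (k - 1).toNat 0 0 (k - 1)
    (by omega) (by omega) (by omega) (by omega) rfl (by omega)
  simp only [Int.toNat_zero] at hdfs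
  rw [hdfs]
  by_cases h1 : k - 1 ≤ 0
  · rw [if_pos h1]
    have h0 : (k - 1).toNat = 0 := by omega
    rw [h0]
    simp only [pvCnt]
    rw [altAt_suf pizza hlen 0 0 (by omega) (by omega)]
  · rw [if_neg h1]
    by_cases h2 : ((pvR pizza : Int) + (pvC pizza : Int)) < k - 1
    · rw [if_pos h2]
      exact pvCnt_vanish pizza (k - 1).toNat 0 0 (by omega) (by omega)
    · rw [if_neg h2]
      rw [altIter_spec pizza hlen (k - 1).toNat]
      rw [altAt_dp pizza (k - 1).toNat 0 0 (by omega) (by omega)]
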